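-- pv_equiv track=rewrite | github.com/JoeChapa/Advent-of-Code-2021 | Day 10/Day 10.py | score_syntax_errors
-- ===== SOURCE A (Python) =====
-- def score_syntax_errors(delims):
--     syntax_score = {
--         ')': 3,
--         ']': 57,
--         '}': 1197,
--         '>': 25137,
--     }
--     score = 0
--     for delim in delims:
--         score += syntax_score[delim]
--     return score
-- ===== SOURCE B (Python) =====
-- def score_syntax_errors(delims):
--     syntax_score = {
--         ')': 3,
--         ']': 57,
--         '}': 1197,
--         '>': 25137,
--     }
--     counts = {}
--     for delim in delims:
--         counts[delim] = counts.get(delim, 0) + 1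
--     return sum(count * syntax_score[delim] for delim, count in counts.items())
-- ===== Notes on version B (the rewrite author's own statement) =====
-- stated objective: alternative
-- what changed: B first builds a frequency table of the delimiters in one pass and then computes the total as a weighted sum over the distinct delimiter types (count * score), instead of A's per-element score-table lookup and accumulation; an unknown delimiter still raises KeyError, during the aggregation pass.
import Mathlib
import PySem

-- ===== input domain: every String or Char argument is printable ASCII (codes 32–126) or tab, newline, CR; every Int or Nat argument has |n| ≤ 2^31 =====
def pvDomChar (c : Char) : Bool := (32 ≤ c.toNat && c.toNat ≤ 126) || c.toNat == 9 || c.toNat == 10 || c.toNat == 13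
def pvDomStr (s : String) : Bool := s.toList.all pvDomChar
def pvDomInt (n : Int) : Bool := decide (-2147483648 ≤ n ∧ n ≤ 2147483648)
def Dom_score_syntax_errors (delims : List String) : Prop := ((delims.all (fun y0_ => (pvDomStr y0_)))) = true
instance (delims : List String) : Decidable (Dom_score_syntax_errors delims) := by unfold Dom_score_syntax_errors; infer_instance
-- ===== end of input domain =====

-- B builds a frequency table of the delimiters first and totals count * score over the
-- distinct delimiter types, instead of A's per-element lookup-and-accumulate (alternative
-- decomposition; same asymptotic cost).

-- ===== PORT A =====
-- the syntax_score dict literal (shared by both Pythons)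
def pvSyntaxScore : PySem.Dict String Int :=
  PySem.Dict.ofList [(")", 3), ("]", 57), ("}", 1197), (">", 25137)]

-- 'score += syntax_score[delim]'; KeyError (lookup none) is excluded by Pre_, the
-- 0 default is never taken there.
def score_syntax_errors (delims : List String) : Int :=
  delims.foldl (fun score delim => score + PySem.Dict.getD pvSyntaxScore delim 0) 0

-- ===== PORT B =====
-- 'counts[delim] = counts.get(delim, 0) + 1' loop, then
-- 'sum(count * syntax_score[delim] for delim, count in counts.items())';
-- the KeyError of syntax_score[delim] is excluded by Pre_, the 0 default is never taken there.
def score_syntax_errors_alt (delims : List String) : Int :=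
  ((delims.foldl (fun d x => d.insert x (d.getD x 0 + 1)) PySem.Dict.empty).items.map
    (fun p => p.2 * PySem.Dict.getD pvSyntaxScore p.1 0)).sum

-- ===== PRECONDITION & SPEC =====
-- Pre_ excludes exactly the inputs on which both Pythons raise KeyError: a delimiter
-- outside the score table.
def Pre_score_syntax_errors (delims : List String) : Prop :=
  ∀ d ∈ delims, d ∈ [")", "]", "}", ">"]
instance (delims : List String) : Decidable (Pre_score_syntax_errors delims) := by
  unfold Pre_score_syntax_errors; infer_instance

def pvWitness_score_syntax_errors : List String := [")", "}", ")", ">"]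

def Spec_score_syntax_errors (delims : List String) (out : Int) : Prop :=
  out = score_syntax_errors_alt delims
instance (delims : List String) (out : Int) : Decidable (Spec_score_syntax_errors delims out) := by
  unfold Spec_score_syntax_errors; infer_instance

-- ===== CLAIM (what is proved, stated in full; the proofs are below) =====
def Claim_equal_score_syntax_errors : Prop :=
  ∀ (delims : List String), Dom_score_syntax_errors delims →
    Pre_score_syntax_errors delims →
    Spec_score_syntax_errors delims (score_syntax_errors delims)

-- ===== LEMMAS AND PROOFS =====
-- abbreviation used only in the proofs: the weight of one delimiter
def pvW (d : String) : Int := PySem.Dict.getD pvSyntaxScore d 0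

-- summing an indicator over a duplicate-free list picks out at most one term
lemma pv_sum_ite_single (s : List String) (hs : s.Nodup) (x : String) (c : Int) :
    (s.map (fun k => if k = x then c else 0)).sum = if x ∈ s then c else 0 := by
  induction s with
  | nil => simp
  | cons a t ih =>
    simp only [List.nodup_cons] at hs
    by_cases hax : a = x
    · subst hax
      simp [hs.1, ih hs.2]
    · simp [hax, ih hs.2, Ne.symm hax]

-- B's weighted sum over the frequency table is the plain sum of the weights
lemma pv_counter_sum (l : List String) :
    ((PySem.Set.ofList l).map (fun k => pvW k * (l.count k : Int))).sum = (l.map pvW).sum := by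
  induction l using List.reverseRecOn with
  | nil => simp
  | append_singleton l x ih =>
    rw [PySem.Set.ofList_append_singleton]
    by_cases hx : x ∈ PySem.Set.ofList l
    · rw [PySem.Set.add_of_mem hx]
      have hmap : (PySem.Set.ofList l).map (fun k => pvW k * ((l ++ [x]).count k : Int))
          = (PySem.Set.ofList l).map
              (fun k => pvW k * (l.count k : Int) + (if k = x then pvW x else 0)) := by
        refine List.map_congr_left (fun k _ => ?_)
        by_cases hkx : k = x
        · subst hkx
          simp [List.count_append]
          ring
        · simp [List.count_append, hkx, Ne.symm hkx]
      rw [hmap, PySem.List.sum_map_add_int]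
      rw [pv_sum_ite_single (PySem.Set.ofList l) (PySem.Set.nodup_ofList l) x (pvW x), if_pos hx]
      rw [ih]
      simp
    · rw [PySem.Set.add_of_not_mem hx]
      have hxl : x ∉ l := fun h => hx ((PySem.Set.mem_ofList l x).mpr h)
      have hmap : (PySem.Set.ofList l).map (fun k => pvW k * ((l ++ [x]).count k : Int))
          = (PySem.Set.ofList l).map (fun k => pvW k * (l.count k : Int)) := by
        refine List.map_congr_left (fun k hk => ?_)
        have hkx : k ≠ x := fun h => hx (h ▸ hk)
        simp [List.count_append, Ne.symm hkx]
      rw [List.map_append, List.sum_append, hmap, ih]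
      have hcx : l.count x = 0 := List.count_eq_zero.mpr hxl
      simp [List.count_append, List.count_singleton, hcx]

-- ===== VERDICT (by name: the statement is the Claim_ definition above) =====
theorem score_syntax_errors_spec : Claim_equal_score_syntax_errors := by
  intro delims _ _
  unfold Spec_score_syntax_errors score_syntax_errors score_syntax_errors_alt
  rw [PySem.List.foldl_add]
  rw [PySem.Dict.foldl_insert_getD_add_one_eq_counter delims]
  rw [PySem.Dict.items_counter, List.map_map]
  have : ((fun p : String × Int => p.2 * PySem.Dict.getD pvSyntaxScore p.1 0) ∘
            fun k => (k, (delims.count k : Int)))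
      = fun k => pvW k * (delims.count k : Int) := by
    funext k; simp [pvW]; ring
  rw [this, pv_counter_sum]
  simp only [zero_add]
  unfold pvW
  rfl
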